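-- pv_equiv track=rewrite | github.com/junes7/python_algorithm | 백준/Gold/1562. 계단 수/계단 수.py | count_stair_numbers
-- ===== SOURCE A (Python) =====
-- def count_stair_numbers(n):
--     # MOD 상수 정의
--     MOD = 1000000000
--     # dp[i][j][used]: i자리, 마지막 숫자가 j이고, used 상태의 계단 수 개수
--     dp = [[[0] * (1 << 10) for _ in range(10)] for _ in range(n + 1)]
--     # 초기값 설정 - 한 자리 숫자의 경우
--     for i in range(1, 10):  # 0으로 시작하는 수는 제외
--         dp[1][i][1<<i] = 1  # 각 숫자의 사용 여부를 비트마스크로 표시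
--     # n자리 숫자에 대해 계산
--     for length in range(1, n):
--         for last in range(10):
--             for used in range(1 << 10):
--                 if dp[length][last][used] == 0:
--                     continue
--                 # 이전 숫자보다 1 큰 경우
--                 if last < 9:
--                     next_used = used | (1 << (last + 1))
--                     dp[length + 1][last + 1][next_used] = (dp[length + 1][last + 1][next_used] + dp[length][last][used]) % MOD
--                 # 이전 숫자보다 1 작은 경우
--                 if last > 0:
--                     next_used = used | (1 << (last - 1))
--                     dp[length + 1][last - 1][next_used] = (dp[length + 1][last - 1][next_used] + dp[length][last][used]) % MOD
--     # 모든 숫자를 사용한 경우의 답 계산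
--     answer = 0
--     all_used = (1 << 10) - 1  # 모든 숫자가 사용된 상태
--     for last in range(10):
--         answer = (answer + dp[n][last][all_used]) % MOD
--     return answer
-- ===== SOURCE B (Python) =====
-- def count_stair_numbers(n):
--     MOD = 1000000000
--     # The digits of a stair number always form a contiguous interval, so
--     # "uses all ten digits" is obtained by inclusion-exclusion over whether
--     # digit 0 and digit 9 are used, from counts restricted to digit ranges.
--     def count_range(lo, hi):
--         # stair numbers of length n (no leading zero) whose digits lie in [lo, hi]
--         row = [1 if lo <= d <= hi and d >= 1 else 0 for d in range(10)]
--         for _ in range(n - 1):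
--             row = [((row[d - 1] if d > 0 else 0) + (row[d + 1] if d < 9 else 0)) % MOD
--                    if lo <= d <= hi else 0 for d in range(10)]
--         return sum(row) % MOD
--     return (count_range(0, 9) - count_range(1, 9) - count_range(0, 8) + count_range(1, 8)) % MOD
-- ===== Notes on version B (the rewrite author's own statement) =====
-- stated objective: faster
-- what changed: Replaces A's 10x1024 bitmask DP over all digit subsets by inclusion-exclusion over four digit ranges, each counted with a plain 10-entry row DP (valid because the digits of a stair number always form a contiguous interval).
import Mathlib
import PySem

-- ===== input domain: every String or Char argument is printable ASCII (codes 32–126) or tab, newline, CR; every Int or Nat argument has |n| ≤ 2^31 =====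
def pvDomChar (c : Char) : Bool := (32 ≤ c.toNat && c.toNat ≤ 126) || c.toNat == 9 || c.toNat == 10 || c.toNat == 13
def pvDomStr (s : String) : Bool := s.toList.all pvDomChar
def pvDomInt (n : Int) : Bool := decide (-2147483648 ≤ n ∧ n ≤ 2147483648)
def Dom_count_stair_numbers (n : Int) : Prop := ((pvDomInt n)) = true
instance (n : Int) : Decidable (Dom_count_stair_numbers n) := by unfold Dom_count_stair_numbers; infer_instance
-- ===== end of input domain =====

-- B replaces A's 10×1024 digit-subset (bitmask) DP by inclusion-exclusion over four digit ranges,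
-- each counted with a plain 10-entry row DP (sound because the digits of a stair number always
-- form a contiguous interval); measurably faster by removing the 2^10 mask dimension.

-- ===== PORT A =====
-- A's 3-D array dp is touched only at rows `length` (read) and `length+1` (written), so the port
-- carries the two rows as 10×1024 layers of nested Arrays (mirroring Python's nested lists);
-- pvUpdArr is a single cell assignment, pvAtArr a single cell read (indices always in range here).
-- `last`/`used`/bitmask arithmetic is on Nat: in A these Python ints are always ≥ 0, where
-- `|`, `<<` coincide with Nat.lor / Nat.shiftLeft.
def pvAtArr (a : Array (Array Int)) (i j : Nat) : Int := ((a[i]?.getD #[])[j]?).getD 0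

def pvUpdArr (a : Array (Array Int)) (i j : Nat) (v : Int) : Array (Array Int) :=
  a.modify i (fun row => row.setIfInBounds j v)

-- [[0] * 1024 for _ in range(10)] : one fresh dp row
def pvZeroLayer : Array (Array Int) := Array.replicate 10 (Array.replicate 1024 0)

-- the body of A's innermost loop (one (last, used) iteration, cur = dp[length], nx = dp[length+1])
def pvStepArrA (cur nx : Array (Array Int)) (last used : Nat) : Array (Array Int) :=
  if pvAtArr cur last used = 0 then nx
  else
    let nx1 :=
      if last < 9 then
        let nu := used ||| (1 <<< (last + 1))
        pvUpdArr nx (last + 1) nu ((pvAtArr nx (last + 1) nu + pvAtArr cur last used) % 1000000000)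
      else nx
    if last > 0 then
      let nu := used ||| (1 <<< (last - 1))
      pvUpdArr nx1 (last - 1) nu ((pvAtArr nx1 (last - 1) nu + pvAtArr cur last used) % 1000000000)
    else nx1

-- one iteration of A's `for length` loop: builds dp[length+1] from dp[length]
def pvPushLayerArr (cur : Array (Array Int)) : Array (Array Int) :=
  (List.range 10).foldl
    (fun nx last => (List.range 1024).foldl (fun nx' used => pvStepArrA cur nx' last used) nx)
    pvZeroLayer

-- dp[1] after the initialisation loop `for i in range(1, 10): dp[1][i][1<<i] = 1`
def pvInitArr : Array (Array Int) :=
  (List.range' 1 9).foldl (fun dp i => pvUpdArr dp i (1 <<< i) 1) pvZeroLayer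

def count_stair_numbers (n : Int) : Int :=
  let dpn := (PySem.List.pyRange 1 n 1).foldl (fun cur _ => pvPushLayerArr cur) pvInitArr
  (List.range 10).foldl (fun answer last => (answer + pvAtArr dpn last 1023) % 1000000000) 0

-- ===== PORT B =====
-- Source B keeps, per digit range [lo, hi], one 10-entry row of counts; the rows are Python list
-- comprehensions over range(10), ported as (List.range 10).map.  The row[d-1] / row[d+1] reads
-- are guarded by d > 0 / d < 9, so they index a length-10 list in range: getD is exact there.
def pvRowInit (lo hi : Nat) : List Int :=
  (List.range 10).map (fun d => if lo ≤ d ∧ d ≤ hi ∧ 1 ≤ d then 1 else 0)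

def pvRowStep (lo hi : Nat) (row : List Int) : List Int :=
  (List.range 10).map (fun d =>
    if lo ≤ d ∧ d ≤ hi then
      ((if d > 0 then row.getD (d - 1) 0 else 0) +
       (if d < 9 then row.getD (d + 1) 0 else 0)) % 1000000000
    else 0)

def pvCountRange (n : Int) (lo hi : Nat) : Int :=
  (((PySem.List.pyRange 0 (n - 1) 1).foldl (fun row _ => pvRowStep lo hi row)
      (pvRowInit lo hi)).sum) % 1000000000

def count_stair_numbers_alt (n : Int) : Int :=
  PySem.Int.mod
    (pvCountRange n 0 9 - pvCountRange n 1 9 - pvCountRange n 0 8 + pvCountRange n 1 8)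
    1000000000

-- ===== PRECONDITION & SPEC =====
-- A raises IndexError (dp[1] on a table of ≤ 1 rows) whenever n < 1; those inputs are excluded
-- (B returns 0 there instead).
def Pre_count_stair_numbers (n : Int) : Prop := 1 ≤ n
instance (n : Int) : Decidable (Pre_count_stair_numbers n) := by
  unfold Pre_count_stair_numbers; infer_instance
def pvWitness_count_stair_numbers : Int := 3

def Spec_count_stair_numbers (n : Int) (out : Int) : Prop := out = count_stair_numbers_alt n
instance (n : Int) (out : Int) : Decidable (Spec_count_stair_numbers n out) := by
  unfold Spec_count_stair_numbers; infer_instance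

-- ===== CLAIM (what is proved, stated in full; the proofs are below) =====
def Claim_equal_count_stair_numbers : Prop :=
  ∀ (n : Int), Dom_count_stair_numbers n → Pre_count_stair_numbers n →
    Spec_count_stair_numbers n (count_stair_numbers n)

-- ===== LEMMAS AND PROOFS =====

-- the function-level model of A's push loop, used to run the scatter → gather argument
def pvUpd (f : Nat → Nat → Int) (a b : Nat) (v : Int) : Nat → Nat → Int :=
  fun x y => if x = a ∧ y = b then v else f x y

-- the body of A's innermost loop (one (last, used) iteration, cur = dp[length], nx = dp[length+1])
def pvStepA (cur nx : Nat → Nat → Int) (last used : Nat) : Nat → Nat → Int :=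
  if cur last used = 0 then nx
  else
    let nx1 :=
      if last < 9 then
        let nu := used ||| (1 <<< (last + 1))
        pvUpd nx (last + 1) nu ((nx (last + 1) nu + cur last used) % 1000000000)
      else nx
    if last > 0 then
      let nu := used ||| (1 <<< (last - 1))
      pvUpd nx1 (last - 1) nu ((nx1 (last - 1) nu + cur last used) % 1000000000)
    else nx1

-- one iteration of A's `for length` loop: builds dp[length+1] from dp[length]
def pvPushLayer (cur : Nat → Nat → Int) : Nat → Nat → Int :=
  (List.range 10).foldl
    (fun nx last => (List.range 1024).foldl (fun nx' used => pvStepA cur nx' last used) nx)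
    (fun _ _ => 0)

-- dp[1] after the initialisation loop `for i in range(1, 10): dp[1][i][1<<i] = 1`
def pvInitA : Nat → Nat → Int :=
  (List.range' 1 9).foldl (fun dp i => pvUpd dp i (1 <<< i) 1) (fun _ _ => 0)

-- the common mathematical recurrence both sides are reduced to, as a pure function on layers
def pvG0 (t m : Nat) : Int := if 1 ≤ t ∧ m = 1 <<< t then 1 else 0

def pvGstep (c : Nat → Nat → Int) (t m : Nat) : Int :=
  if (m >>> t) &&& 1 = 1 then
    ((if t > 0 then c (t - 1) m + c (t - 1) (m ^^^ (1 <<< t)) else 0) +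
     (if t < 9 then c (t + 1) m + c (t + 1) (m ^^^ (1 <<< t)) else 0)) % 1000000000
  else 0

-- ---- generic fold helpers ----
theorem pv_foldl_const {α β : Type} (l : List α) (F : β → β) (init : β) :
    l.foldl (fun s _ => F s) init = F^[l.length] init := by
  induction l generalizing init with
  | nil => rfl
  | cons x xs ih => simp [List.foldl_cons, ih, Function.iterate_succ_apply]

-- stepwise (x + v) % M accumulation from a reduced start = one mod of the total sum
theorem pv_chain_red (vs : List Int) (a : Int) (h : a % 1000000000 = a) :
    vs.foldl (fun x v => (x + v) % 1000000000) a = (a + vs.sum) % 1000000000 := by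
  induction vs generalizing a with
  | nil => simpa using h.symm
  | cons v vs ih =>
    simp only [List.foldl_cons, List.sum_cons]
    rw [ih ((a + v) % 1000000000) (by omega)]
    omega

-- single-point indicator sum over a range
theorem pv_sum_range_single (n a : Nat) (f : Nat → Int) (h : a < n) :
    ((List.range n).map (fun u => if u = a then f u else 0)).sum = f a := by
  induction n with
  | zero => omega
  | succ n ih =>
    rw [List.range_succ, List.map_append, List.sum_append]
    by_cases ha : a = n
    · subst ha
      have : ((List.range a).map (fun u => if u = a then f u else 0)).sum = 0 := by
        apply List.sum_eq_zero
        intro x hx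
        simp only [List.mem_map, List.mem_range] at hx
        obtain ⟨u, hu, rfl⟩ := hx
        simp [Nat.ne_of_lt hu]
      simp [this]
    · have := ih (by omega)
      simp only [this]
      have h2 : ((fun u => if u = a then f u else 0) n) = 0 := by simp [Ne.symm ha]
      simp only [List.map_cons, List.map_nil, List.sum_cons, List.sum_nil, h2]
      ring

-- ---- bit facts ----
theorem pv_bit_testBit (m t : Nat) : ((m >>> t) &&& 1 = 1) ↔ m.testBit t = true := by
  rw [Nat.and_one_is_mod, Nat.shiftRight_eq_div_pow, Nat.testBit_eq_decide_div_mod_eq]; simp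

theorem pv_bit_iff (m t : Nat) : ((m >>> t) &&& 1 = 1) ↔ m ||| (1 <<< t) = m := by
  have h1 : (1 : Nat) <<< t = 2 ^ t := by simp [Nat.shiftLeft_eq]
  rw [pv_bit_testBit, h1]
  constructor
  · intro hb
    apply Nat.eq_of_testBit_eq
    intro i
    rw [Nat.testBit_lor, Nat.testBit_two_pow]
    by_cases hi : t = i
    · subst hi; simp [hb]
    · simp [hi]
  · intro he
    have := congrArg (fun x => x.testBit t) he
    simpa [Nat.testBit_lor, Nat.testBit_two_pow] using this

theorem pv_or_solutions (m t u : Nat) (hset : m ||| (1 <<< t) = m) :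
    u ||| (1 <<< t) = m ↔ u = m ^^^ (1 <<< t) ∨ u = m := by
  have h1 : (1 : Nat) <<< t = 2 ^ t := by simp [Nat.shiftLeft_eq]
  rw [h1] at hset ⊢
  have hmt : m.testBit t = true := by
    have := congrArg (fun x => x.testBit t) hset
    simpa [Nat.testBit_lor, Nat.testBit_two_pow] using this
  constructor
  · intro he
    by_cases hu : u.testBit t = true
    · right
      apply Nat.eq_of_testBit_eq
      intro i
      have := congrArg (fun x => x.testBit i) he
      simp only [Nat.testBit_lor, Nat.testBit_two_pow] at this
      by_cases hi : t = i
      · subst hi; simp [hu, hmt]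
      · simpa [hi] using this
    · left
      apply Nat.eq_of_testBit_eq
      intro i
      have := congrArg (fun x => x.testBit i) he
      simp only [Nat.testBit_lor, Nat.testBit_two_pow] at this
      rw [Nat.testBit_xor, Nat.testBit_two_pow]
      by_cases hi : t = i
      · subst hi; simp [hmt]; simpa using hu
      · simpa [hi] using this
  · rintro (rfl | rfl)
    · apply Nat.eq_of_testBit_eq
      intro i
      simp only [Nat.testBit_lor, Nat.testBit_xor, Nat.testBit_two_pow]
      by_cases hi : t = i
      · subst hi; simp [hmt]
      · simp [hi]
    · exact hset

theorem pv_xor_lt (m t : Nat) (hm : m < 1024) (ht : t < 10) : m ^^^ (1 <<< t) < 1024 := by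
  have h1 : (1 : Nat) <<< t = 2 ^ t := by simp [Nat.shiftLeft_eq]
  have : (2 : Nat) ^ t < 2 ^ 10 := Nat.pow_lt_pow_right (by omega) ht
  calc m ^^^ (1 <<< t) < 2 ^ 10 := by
        rw [h1]; exact Nat.xor_lt_two_pow (by omega) (by omega)
    _ = 1024 := by norm_num

-- ---- the scatter → gather argument for A's inner double loop ----

-- the contribution iteration (l, u) of A's inner loops makes to target cell (t, m)
def pvContrib (cur : Nat → Nat → Int) (t m : Nat) (p : Nat × Nat) : Int :=
  if (p.1 < 9 ∧ t = p.1 + 1 ∧ m = p.2 ||| (1 <<< (p.1 + 1))) ∨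
     (p.1 > 0 ∧ t = p.1 - 1 ∧ m = p.2 ||| (1 <<< (p.1 - 1)))
  then cur p.1 p.2 else 0

-- one iteration of A's inner loop, observed at a single target cell (t, m)
theorem pv_step_cell (cur nx : Nat → Nat → Int) (l u t m : Nat) (hz : cur l u ≠ 0) :
    (pvStepA cur nx l u) t m =
      if (l < 9 ∧ t = l + 1 ∧ m = u ||| (1 <<< (l + 1))) ∨
         (l > 0 ∧ t = l - 1 ∧ m = u ||| (1 <<< (l - 1)))
      then (nx t m + cur l u) % 1000000000 else nx t m := by
  unfold pvStepA
  rw [if_neg hz]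
  by_cases h9 : l < 9 <;> by_cases h0 : l > 0 <;>
    simp only [h9, h0, if_true, if_false, pvUpd] <;>
    split_ifs <;> first | rfl | omega | (simp_all; omega) | simp_all

theorem pv_scatter (cur : Nat → Nat → Int) (t m : Nat) (ps : List (Nat × Nat))
    (nx : Nat → Nat → Int) (hred : nx t m % 1000000000 = nx t m) :
    (ps.foldl (fun a p => pvStepA cur a p.1 p.2) nx) t m =
      (ps.map (pvContrib cur t m)).foldl (fun x v => (x + v) % 1000000000) (nx t m) := by
  induction ps generalizing nx with
  | nil => rfl
  | cons p ps ih =>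
    simp only [List.foldl_cons, List.map_cons]
    by_cases hz : cur p.1 p.2 = 0
    · have hstep : pvStepA cur nx p.1 p.2 = nx := by unfold pvStepA; rw [if_pos hz]
      have hc : pvContrib cur t m p = 0 := by
        unfold pvContrib; split_ifs <;> simp [hz]
      rw [hstep, ih nx hred, hc, add_zero, hred]
    · by_cases hC : (p.1 < 9 ∧ t = p.1 + 1 ∧ m = p.2 ||| (1 <<< (p.1 + 1))) ∨
          (p.1 > 0 ∧ t = p.1 - 1 ∧ m = p.2 ||| (1 <<< (p.1 - 1)))
      · have hcell := pv_step_cell cur nx p.1 p.2 t m hz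
        rw [if_pos hC] at hcell
        have hred' : (pvStepA cur nx p.1 p.2) t m % 1000000000 =
            (pvStepA cur nx p.1 p.2) t m := by rw [hcell]; omega
        rw [ih _ hred', hcell]
        have hc : pvContrib cur t m p = cur p.1 p.2 := by unfold pvContrib; rw [if_pos hC]
        rw [hc]
      · have hcell := pv_step_cell cur nx p.1 p.2 t m hz
        rw [if_neg hC] at hcell
        have hred' : (pvStepA cur nx p.1 p.2) t m % 1000000000 =
            (pvStepA cur nx p.1 p.2) t m := by rw [hcell]; exact hred
        rw [ih _ hred', hcell]
        have hc : pvContrib cur t m p = 0 := by unfold pvContrib; rw [if_neg hC]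
        rw [hc, add_zero, hred]

-- two-point indicator sum over a range
theorem pv_sum_range_two (n a b : Nat) (f : Nat → Int) (hab : a ≠ b) (ha : a < n) (hb : b < n) :
    ((List.range n).map (fun u => if u = a ∨ u = b then f u else 0)).sum = f a + f b := by
  have hpt : ∀ u, (if u = a ∨ u = b then f u else 0) =
      (if u = a then f u else 0) + (if u = b then f u else 0) := by
    intro u
    by_cases h1 : u = a
    · subst h1; simp [hab]
    · by_cases h2 : u = b
      · subst h2; simp [h1]
      · simp [h1, h2]
  simp only [hpt]
  rw [PySem.List.sum_map_add_int]
  rw [pv_sum_range_single n a f ha, pv_sum_range_single n b f hb]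

theorem pv_sum_map_flatMap {α β : Type} (l : List α) (f : α → List β) (g : β → Int) :
    ((l.flatMap f).map g).sum = (l.map (fun a => ((f a).map g).sum)).sum := by
  induction l with
  | nil => rfl
  | cons x xs ih => simp [List.flatMap_cons, ih]

theorem pv_sum_map_zero {α : Type} (l : List α) : (l.map (fun _ => (0 : Int))).sum = 0 := by
  induction l with
  | nil => rfl
  | cons x xs ih => simp

-- the inner sum over all 1024 used-masks, for one source row l
theorem pv_inner_sum (cur : Nat → Nat → Int) (t m l : Nat) (ht : t < 10) (hm : m < 1024)
    (hl : l < 10) (hset : m ||| (1 <<< t) = m) :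
    ((List.range 1024).map (fun u => pvContrib cur t m (l, u))).sum =
      (if 1 ≤ t ∧ l = t - 1 then cur l (m ^^^ (1 <<< t)) + cur l m else 0) +
      (if t < 9 ∧ l = t + 1 then cur l (m ^^^ (1 <<< t)) + cur l m else 0) := by
  have hx := pv_xor_lt m t hm ht
  have h1t : (1 : Nat) <<< t = 2 ^ t := by simp [Nat.shiftLeft_eq]
  have hmt : m.testBit t = true := by
    have := congrArg (fun x => x.testBit t) hset
    simpa [h1t, Nat.testBit_lor, Nat.testBit_two_pow] using this
  have hne : m ^^^ (1 <<< t) ≠ m := by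
    intro he
    have := congrArg (fun x => x.testBit t) he
    simp only [h1t, Nat.testBit_xor, Nat.testBit_two_pow] at this
    simp [hmt] at this
  by_cases hc1 : 1 ≤ t ∧ l = t - 1
  · -- row l = t-1 pushes up into t
    obtain ⟨ht1, rfl⟩ := hc1
    have hc2 : ¬ (t < 9 ∧ t - 1 = t + 1) := by omega
    have hpt : ∀ u, pvContrib cur t m (t - 1, u) =
        (if u = m ^^^ (1 <<< t) ∨ u = m then cur (t - 1) u else 0) := by
      intro u
      unfold pvContrib
      dsimp only
      have he : t - 1 + 1 = t := by omega
      rw [he]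
      by_cases hu : u ||| (1 <<< t) = m
      · rw [if_pos (Or.inl ⟨by omega, rfl, hu.symm⟩),
          if_pos ((pv_or_solutions m t u hset).mp hu)]
      · have hno : ¬ (u = m ^^^ (1 <<< t) ∨ u = m) :=
          fun h => hu ((pv_or_solutions m t u hset).mpr h)
        rw [if_neg ?_, if_neg hno]
        rintro (⟨-, -, hm'⟩ | ⟨h0, hteq, -⟩)
        · exact hu hm'.symm
        · omega
    simp only [hpt]
    rw [pv_sum_range_two 1024 (m ^^^ (1 <<< t)) m _ hne hx hm]
    simp [ht1]
  · by_cases hc2 : t < 9 ∧ l = t + 1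
    · -- row l = t+1 pushes down into t
      obtain ⟨ht9, rfl⟩ := hc2
      have hpt : ∀ u, pvContrib cur t m (t + 1, u) =
          (if u = m ^^^ (1 <<< t) ∨ u = m then cur (t + 1) u else 0) := by
        intro u
        unfold pvContrib
        dsimp only
        have he : t + 1 - 1 = t := by omega
        rw [he]
        by_cases hu : u ||| (1 <<< t) = m
        · rw [if_pos (Or.inr ⟨by omega, rfl, hu.symm⟩),
            if_pos ((pv_or_solutions m t u hset).mp hu)]
        · have hno : ¬ (u = m ^^^ (1 <<< t) ∨ u = m) :=
            fun h => hu ((pv_or_solutions m t u hset).mpr h)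
          rw [if_neg ?_, if_neg hno]
          rintro (⟨-, hteq, -⟩ | ⟨-, -, hm'⟩)
          · omega
          · exact hu hm'.symm
      simp only [hpt]
      rw [pv_sum_range_two 1024 (m ^^^ (1 <<< t)) m _ hne hx hm]
      simp [ht9, hc1]
    · -- any other row contributes nothing to (t, m)
      have hpt : ∀ u, pvContrib cur t m (l, u) = 0 := by
        intro u
        unfold pvContrib
        dsimp only
        rw [if_neg ?_]
        rintro (⟨-, hteq, -⟩ | ⟨h0, hteq, -⟩)
        · exact hc1 ⟨by omega, by omega⟩
        · exact hc2 ⟨by omega, by omega⟩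
      simp only [hpt, pv_sum_map_zero]
      rw [if_neg hc1, if_neg hc2, add_zero]

-- the full inner double loop equals the gather recurrence, pointwise on the table
theorem pv_pushLayer_eq (cur : Nat → Nat → Int) (t m : Nat) (ht : t < 10) (hm : m < 1024) :
    pvPushLayer cur t m = pvGstep cur t m := by
  have hflat : pvPushLayer cur =
      ((List.range 10).flatMap (fun l => (List.range 1024).map (fun u => (l, u)))).foldl
        (fun a p => pvStepA cur a p.1 p.2) (fun _ _ => 0) := by
    unfold pvPushLayer
    rw [List.foldl_flatMap]
    simp only [List.foldl_map]
  rw [hflat, pv_scatter cur t m _ _ (by norm_num), pv_chain_red _ _ (by norm_num)]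
  rw [pv_sum_map_flatMap]
  simp only [List.map_map, Function.comp_def]
  by_cases hbit : (m >>> t) &&& 1 = 1
  · have hset := (pv_bit_iff m t).mp hbit
    have hinner : (List.range 10).map
        (fun l => ((List.range 1024).map (fun u => pvContrib cur t m (l, u))).sum) =
        (List.range 10).map (fun l =>
          (if 1 ≤ t ∧ l = t - 1 then cur l (m ^^^ (1 <<< t)) + cur l m else 0) +
          (if t < 9 ∧ l = t + 1 then cur l (m ^^^ (1 <<< t)) + cur l m else 0)) := by
      apply List.map_congr_left
      intro l hlmem
      exact pv_inner_sum cur t m l ht hm (List.mem_range.mp hlmem) hset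
    rw [hinner, PySem.List.sum_map_add_int]
    have hs1 : ((List.range 10).map
        (fun l => if 1 ≤ t ∧ l = t - 1 then cur l (m ^^^ (1 <<< t)) + cur l m else 0)).sum =
        (if 1 ≤ t then cur (t - 1) (m ^^^ (1 <<< t)) + cur (t - 1) m else 0) := by
      by_cases ht1 : 1 ≤ t
      · simp only [ht1, true_and, if_true]
        exact pv_sum_range_single 10 (t - 1)
          (fun l => cur l (m ^^^ (1 <<< t)) + cur l m) (by omega)
      · simp [ht1]
    have hs2 : ((List.range 10).map
        (fun l => if t < 9 ∧ l = t + 1 then cur l (m ^^^ (1 <<< t)) + cur l m else 0)).sum =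
        (if t < 9 then cur (t + 1) (m ^^^ (1 <<< t)) + cur (t + 1) m else 0) := by
      by_cases ht9 : t < 9
      · simp only [ht9, true_and, if_true]
        exact pv_sum_range_single 10 (t + 1)
          (fun l => cur l (m ^^^ (1 <<< t)) + cur l m) (by omega)
      · simp [ht9]
    rw [hs1, hs2]
    unfold pvGstep
    rw [if_pos hbit]
    split_ifs <;> omega
  · -- the target bit is absent from m: nothing ever lands on (t, m)
    have hz : ∀ l u : Nat, pvContrib cur t m (l, u) = 0 := by
      intro l u
      unfold pvContrib
      dsimp only
      rw [if_neg ?_]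
      rintro (⟨-, hteq, hm'⟩ | ⟨h0, hteq, hm'⟩) <;>
      · subst hteq
        apply hbit
        apply (pv_bit_iff m _).mpr
        rw [hm', Nat.lor_assoc, Nat.or_self]
    simp only [hz, pv_sum_map_zero]
    unfold pvGstep
    rw [if_neg hbit]
    norm_num

theorem pv_gstep_congr (c1 c2 : Nat → Nat → Int)
    (h : ∀ a b, a < 10 → b < 1024 → c1 a b = c2 a b) (t m : Nat) (ht : t < 10) (hm : m < 1024) :
    pvGstep c1 t m = pvGstep c2 t m := by
  have hx := pv_xor_lt m t hm ht
  have key : ∀ a, a < 10 → c1 a m + c1 a (m ^^^ (1 <<< t)) = c2 a m + c2 a (m ^^^ (1 <<< t)) :=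
    fun a ha => by rw [h a m ha hm, h a _ ha hx]
  unfold pvGstep
  split_ifs <;> try rfl
  all_goals first
    | rw [key (t - 1) (by omega), key (t + 1) (by omega)]
    | rw [key (t - 1) (by omega)]
    | rw [key (t + 1) (by omega)]

-- ---- the two iterations agree at the start ----
set_option maxRecDepth 40000 in
theorem pv_init_eq : ∀ t < 10, ∀ m < 1024, pvInitA t m = pvG0 t m := by decide

-- ---- bridging the Array layers to the function-level model ----

def pvShape (a : Array (Array Int)) : Prop :=
  a.size = 10 ∧ ∀ i, i < 10 → (a[i]?.getD #[]).size = 1024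

theorem pv_shape_zero : pvShape pvZeroLayer := by
  constructor
  · simp [pvZeroLayer]
  · intro i hi
    simp [pvZeroLayer, Array.getElem?_replicate, hi]

theorem pv_at_zero (t m : Nat) : pvAtArr pvZeroLayer t m = 0 := by
  unfold pvAtArr pvZeroLayer
  by_cases ht : t < 10
  · by_cases hm : m < 1024 <;> simp [Array.getElem?_replicate, ht, hm]
  · simp [Array.getElem?_replicate, ht]

theorem pv_shape_upd (a : Array (Array Int)) (i j : Nat) (v : Int) (hsh : pvShape a) :
    pvShape (pvUpdArr a i j v) := by
  obtain ⟨hs, hr⟩ := hsh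
  refine ⟨by simp [pvUpdArr, hs], ?_⟩
  intro x hx
  unfold pvUpdArr
  rw [Array.getElem?_modify]
  by_cases he : i = x
  · subst he
    have hlt : i < a.size := by omega
    have hrow := hr i hx
    rw [Array.getElem?_eq_getElem hlt] at hrow ⊢
    simpa using hrow
  · rw [if_neg he]
    exact hr x hx

theorem pv_at_upd (a : Array (Array Int)) (i j : Nat) (v : Int) (t m : Nat)
    (hsh : pvShape a) (hi : i < 10) (hj : j < 1024) :
    pvAtArr (pvUpdArr a i j v) t m = if t = i ∧ m = j then v else pvAtArr a t m := by
  obtain ⟨hs, hr⟩ := hsh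
  unfold pvAtArr pvUpdArr
  rw [Array.getElem?_modify]
  by_cases he : i = t
  · subst he
    rw [if_pos rfl]
    have hlt : i < a.size := by omega
    have hsz : (a[i]?.getD #[]).size = 1024 := hr i hi
    rw [Array.getElem?_eq_getElem hlt] at hsz ⊢
    simp only [Option.map_some, Option.getD_some] at hsz ⊢
    by_cases hm2 : m = j
    · subst hm2
      have hml : m < (a[i]'hlt).size := by omega
      simp [Array.getElem?_setIfInBounds, hml]
    · have hrne : ¬ (i = i ∧ m = j) := fun h => hm2 h.2
      simp [Array.getElem?_setIfInBounds, hm2, show ¬ j = m from fun h => hm2 h.symm]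
  · have hne : ¬ (t = i ∧ m = j) := fun h => he h.1.symm
    rw [if_neg he, if_neg hne]

-- one array iteration observed through pvAtArr is exactly one function-model iteration
theorem pv_step_bridge (cur nx : Array (Array Int)) (l u : Nat)
    (hsh : pvShape nx) (hl : l < 10) (hu : u < 1024) :
    pvShape (pvStepArrA cur nx l u) ∧
      pvAtArr (pvStepArrA cur nx l u) = pvStepA (pvAtArr cur) (pvAtArr nx) l u := by
  have hbit : ∀ d : Nat, d < 10 → (u ||| (1 <<< d)) < 1024 := by
    intro d hd
    have h1 : (1 : Nat) <<< d = 2 ^ d := by simp [Nat.shiftLeft_eq]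
    have h2 : (2 : Nat) ^ d < 2 ^ 10 := Nat.pow_lt_pow_right (by omega) hd
    have : u ||| (1 <<< d) < 2 ^ 10 := by
      rw [h1]; exact Nat.or_lt_two_pow (by omega) (by omega)
    omega
  unfold pvStepArrA pvStepA
  by_cases hz : pvAtArr cur l u = 0
  · simp only [hz, if_pos rfl]
    exact ⟨hsh, rfl⟩
  · rw [if_neg hz, if_neg hz]
    by_cases h9 : l < 9 <;> by_cases h0 : l > 0 <;>
      simp only [h9, h0, if_true, if_false] <;>
      (try dsimp only)
    · -- l < 9 and l > 0 : both updates happen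
      have hsh1 := pv_shape_upd nx (l + 1) (u ||| (1 <<< (l + 1)))
        ((pvAtArr nx (l + 1) (u ||| (1 <<< (l + 1))) + pvAtArr cur l u) % 1000000000) hsh
      refine ⟨pv_shape_upd _ _ _ _ hsh1, ?_⟩
      funext t m
      rw [pv_at_upd _ _ _ _ t m hsh1 (by omega) (hbit _ (by omega))]
      rw [pv_at_upd _ _ _ _ (l - 1) (u ||| (1 <<< (l - 1))) hsh (by omega) (hbit _ (by omega))]
      rw [pv_at_upd _ _ _ _ t m hsh (by omega) (hbit _ (by omega))]
      simp only [pvUpd]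
    · -- only the upward update (l < 9, l = 0)
      refine ⟨pv_shape_upd _ _ _ _ hsh, ?_⟩
      funext t m
      rw [pv_at_upd _ _ _ _ t m hsh (by omega) (hbit _ (by omega))]
      rfl
    · -- only the downward update (l = 9 > 0)
      refine ⟨pv_shape_upd _ _ _ _ hsh, ?_⟩
      funext t m
      rw [pv_at_upd _ _ _ _ t m hsh (by omega) (hbit _ (by omega))]
      rfl
    · exact ⟨hsh, by first | rfl | trivial⟩

theorem pv_fold_bridge (cur : Array (Array Int)) (ps : List (Nat × Nat))
    (hb : ∀ p ∈ ps, p.1 < 10 ∧ p.2 < 1024) :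
    ∀ nx : Array (Array Int), pvShape nx →
      pvShape (ps.foldl (fun a p => pvStepArrA cur a p.1 p.2) nx) ∧
      pvAtArr (ps.foldl (fun a p => pvStepArrA cur a p.1 p.2) nx) =
        ps.foldl (fun f p => pvStepA (pvAtArr cur) f p.1 p.2) (pvAtArr nx) := by
  induction ps with
  | nil => intro nx hsh; exact ⟨hsh, rfl⟩
  | cons p ps ih =>
    intro nx hsh
    have hp := hb p (List.mem_cons_self)
    obtain ⟨hsh', habs⟩ := pv_step_bridge cur nx p.1 p.2 hsh hp.1 hp.2
    obtain ⟨hsh'', habs'⟩ := ih (fun q hq => hb q (List.mem_cons_of_mem p hq)) _ hsh'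
    refine ⟨hsh'', ?_⟩
    simp only [List.foldl_cons]
    rw [habs', habs]

theorem pv_pushLayer_bridge (cur : Array (Array Int)) :
    pvShape (pvPushLayerArr cur) ∧
      pvAtArr (pvPushLayerArr cur) = pvPushLayer (pvAtArr cur) := by
  have hflatA : pvPushLayerArr cur =
      ((List.range 10).flatMap (fun l => (List.range 1024).map (fun u => (l, u)))).foldl
        (fun a p => pvStepArrA cur a p.1 p.2) pvZeroLayer := by
    unfold pvPushLayerArr
    rw [List.foldl_flatMap]
    simp only [List.foldl_map]
  have hflatF : pvPushLayer (pvAtArr cur) =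
      ((List.range 10).flatMap (fun l => (List.range 1024).map (fun u => (l, u)))).foldl
        (fun f p => pvStepA (pvAtArr cur) f p.1 p.2) (fun _ _ => 0) := by
    unfold pvPushLayer
    rw [List.foldl_flatMap]
    simp only [List.foldl_map]
  have hb : ∀ p ∈ (List.range 10).flatMap (fun l => (List.range 1024).map (fun u => (l, u))),
      p.1 < 10 ∧ p.2 < 1024 := by
    intro p hp
    simp only [List.mem_flatMap, List.mem_map, List.mem_range] at hp
    obtain ⟨l, hl, u, hu, rfl⟩ := hp
    exact ⟨hl, hu⟩
  obtain ⟨hsh, habs⟩ := pv_fold_bridge cur _ hb pvZeroLayer pv_shape_zero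
  rw [hflatA, hflatF]
  refine ⟨hsh, ?_⟩
  rw [habs, show pvAtArr pvZeroLayer = (fun _ _ => 0) from funext fun t => funext fun m => pv_at_zero t m]

theorem pv_fold_upd_bridge (is : List Nat) (hball : ∀ i ∈ is, i < 10 ∧ (1 <<< i) < 1024) :
    ∀ a : Array (Array Int), pvShape a →
      pvShape (is.foldl (fun dp i => pvUpdArr dp i (1 <<< i) 1) a) ∧
      pvAtArr (is.foldl (fun dp i => pvUpdArr dp i (1 <<< i) 1) a) =
        is.foldl (fun dp i => pvUpd dp i (1 <<< i) 1) (pvAtArr a) := by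
  induction is with
  | nil => intro a hsh; exact ⟨hsh, rfl⟩
  | cons i is ih =>
    intro a hsh
    have hi := hball i (List.mem_cons_self)
    have hsh' := pv_shape_upd a i (1 <<< i) 1 hsh
    obtain ⟨hsh'', habs⟩ := ih (fun q hq => hball q (List.mem_cons_of_mem i hq)) _ hsh'
    refine ⟨hsh'', ?_⟩
    simp only [List.foldl_cons]
    rw [habs]
    congr 1
    funext t m
    rw [pv_at_upd a i (1 <<< i) 1 t m hsh hi.1 hi.2]
    rfl

theorem pv_range'_bound : ∀ i ∈ List.range' 1 9, i < 10 ∧ (1 <<< i) < 1024 := by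
  intro i hi
  rw [List.mem_range'_1] at hi
  have h1 : (1 : Nat) <<< i = 2 ^ i := by simp [Nat.shiftLeft_eq]
  have h2 : (2 : Nat) ^ i ≤ 2 ^ 9 := Nat.pow_le_pow_right (by omega) (by omega)
  constructor
  · omega
  · rw [h1]; norm_num at h2 ⊢; omega

theorem pv_shape_init : pvShape pvInitArr :=
  (pv_fold_upd_bridge _ pv_range'_bound pvZeroLayer pv_shape_zero).1

theorem pv_init_bridge : pvAtArr pvInitArr = pvInitA := by
  unfold pvInitArr pvInitA
  obtain ⟨-, habs⟩ := pv_fold_upd_bridge _ pv_range'_bound pvZeroLayer pv_shape_zero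
  rw [habs, show pvAtArr pvZeroLayer = (fun _ _ => 0) from funext fun t => funext fun m => pv_at_zero t m]

-- A's iteration computes the gather recurrence pvGstep^[k] pvG0, cell by cell
theorem pv_iterA (k : Nat) :
    pvShape (pvPushLayerArr^[k] pvInitArr) ∧
      ∀ t < 10, ∀ m < 1024,
        pvAtArr (pvPushLayerArr^[k] pvInitArr) t m = pvGstep^[k] pvG0 t m := by
  induction k with
  | zero =>
    simp only [Function.iterate_zero_apply]
    refine ⟨pv_shape_init, ?_⟩
    intro t ht m hm
    rw [pv_init_bridge]
    exact pv_init_eq t ht m hm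
  | succ k ih =>
    obtain ⟨hsh, hval⟩ := ih
    rw [Function.iterate_succ_apply', Function.iterate_succ_apply']
    obtain ⟨hsh', habs⟩ := pv_pushLayer_bridge (pvPushLayerArr^[k] pvInitArr)
    refine ⟨hsh', ?_⟩
    intro t ht m hm
    rw [habs, pv_pushLayer_eq _ t m ht hm]
    exact pv_gstep_congr _ _ (fun a b ha hb => hval a ha b hb) t m ht hm

-- ---- B side: the used-digits-form-an-interval invariant ----

-- the mask with exactly the bits a..b set
def pvIvMask (a b : Nat) : Nat := (2 ^ (b + 1 - a) - 1) <<< a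

-- the invariant of the gather recurrence: a nonzero cell's mask is an interval of digits
-- containing the cell's last digit
def pvOK (t m : Nat) : Prop := ∃ a, ∃ b, a ≤ t ∧ t ≤ b ∧ b ≤ 9 ∧ m = pvIvMask a b

theorem pv_ivMask_testBit (a b i : Nat) (hab : a ≤ b) :
    (pvIvMask a b).testBit i = decide (a ≤ i ∧ i ≤ b) := by
  unfold pvIvMask
  rw [Nat.testBit_shiftLeft, Nat.testBit_two_pow_sub_one]
  by_cases h1 : a ≤ i
  · by_cases h2 : i ≤ b
    · have h3 : i - a < b + 1 - a := by omega
      simp [h1, h2, h3]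
    · have h3 : ¬ (i - a < b + 1 - a) := by omega
      simp [h1, h2, h3]
  · simp [h1]

theorem pv_ivMask_self (t : Nat) : pvIvMask t t = 1 <<< t := by
  unfold pvIvMask
  rw [show t + 1 - t = 1 from by omega]
  norm_num

theorem pv_ok_init (t m : Nat) (ht : t < 10) (h : pvG0 t m ≠ 0) : pvOK t m := by
  unfold pvG0 at h
  split_ifs at h with hc
  · obtain ⟨ht1, rfl⟩ := hc
    exact ⟨t, t, le_refl t, le_refl t, by omega, (pv_ivMask_self t).symm⟩
  · exact absurd rfl h

theorem pv_xor_bit_self (m t : Nat) : (m ^^^ (1 <<< t)).testBit t = !m.testBit t := by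
  rw [Nat.testBit_xor, Nat.one_shiftLeft, Nat.testBit_two_pow]
  simp

theorem pv_ivMask_ext_hi (a b : Nat) (hab : a ≤ b) :
    pvIvMask a b ^^^ (1 <<< (b + 1)) = pvIvMask a (b + 1) := by
  apply Nat.eq_of_testBit_eq
  intro i
  rw [Nat.testBit_xor, pv_ivMask_testBit a b i hab, pv_ivMask_testBit a (b + 1) i (by omega),
      Nat.one_shiftLeft, Nat.testBit_two_pow]
  by_cases h1 : b + 1 = i
  · subst h1
    have h2 : ¬ (a ≤ b + 1 ∧ b + 1 ≤ b) := by omega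
    have h3 : a ≤ b + 1 ∧ b + 1 ≤ b + 1 := by omega
    simp [h2, h3]

  · simp only [h1, decide_false, Bool.xor_false]
    exact decide_eq_decide.mpr (by omega)

theorem pv_ivMask_ext_lo (a b : Nat) (ha : 1 ≤ a) (hab : a ≤ b) :
    pvIvMask a b ^^^ (1 <<< (a - 1)) = pvIvMask (a - 1) b := by
  apply Nat.eq_of_testBit_eq
  intro i
  rw [Nat.testBit_xor, pv_ivMask_testBit a b i hab, pv_ivMask_testBit (a - 1) b i (by omega),
      Nat.one_shiftLeft, Nat.testBit_two_pow]
  by_cases h1 : a - 1 = i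
  · subst h1
    have h2 : ¬ (a ≤ a - 1 ∧ a - 1 ≤ b) := by omega
    have h3 : a - 1 ≤ a - 1 ∧ a - 1 ≤ b := by omega
    simp [h2, h3]
    omega
  · simp only [h1, decide_false, Bool.xor_false]
    exact decide_eq_decide.mpr (by omega)

theorem pv_step_ok (t m : Nat) (ht : t < 10) (hbit : m.testBit t = true)
    (h : pvOK (t - 1) m ∨ pvOK (t + 1) m ∨
         pvOK (t - 1) (m ^^^ (1 <<< t)) ∨ pvOK (t + 1) (m ^^^ (1 <<< t))) :
    pvOK t m := by
  have hin : ∀ s, pvOK s m → pvOK t m := by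
    intro s hs
    obtain ⟨a, b, has, hsb, hb9, rfl⟩ := hs
    have hb' := hbit
    rw [pv_ivMask_testBit a b t (by omega)] at hb'
    have hc := of_decide_eq_true hb'
    exact ⟨a, b, hc.1, hc.2, hb9, rfl⟩
  have hout : ∀ s, (s = t - 1 ∨ s = t + 1) → pvOK s (m ^^^ (1 <<< t)) → pvOK t m := by
    intro s hst hs
    obtain ⟨a, b, has, hsb, hb9, hmeq⟩ := hs
    have hm' : m = pvIvMask a b ^^^ (1 <<< t) := by
      rw [← hmeq]
      simp [Nat.xor_assoc]
    have hnotin : ¬ (a ≤ t ∧ t ≤ b) := by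
      intro hc
      have h0 : (m ^^^ (1 <<< t)).testBit t = !m.testBit t := pv_xor_bit_self m t
      rw [hmeq, pv_ivMask_testBit a b t (by omega), hbit, decide_eq_true hc] at h0
      simp at h0
    rcases hst with rfl | rfl
    · have hts : t = b + 1 := by omega
      subst hts
      rw [hm', pv_ivMask_ext_hi a b (by omega)]
      exact ⟨a, b + 1, by omega, by omega, by omega, rfl⟩
    · have hta : a = t + 1 := by omega
      subst hta
      rw [hm', show (1 <<< t) = (1 <<< (t + 1 - 1)) from by norm_num,
          pv_ivMask_ext_lo (t + 1) b (by omega) (by omega)]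
      exact ⟨t + 1 - 1, b, by omega, by omega, hb9, rfl⟩
  rcases h with h | h | h | h
  · exact hin _ h
  · exact hin _ h
  · exact hout _ (Or.inl rfl) h
  · exact hout _ (Or.inr rfl) h

theorem pv_inv : ∀ k, ∀ t, t < 10 → ∀ m, m < 1024 →
    (pvGstep^[k] pvG0) t m ≠ 0 → pvOK t m := by
  intro k
  induction k with
  | zero =>
    intro t ht m hm h
    simp only [Function.iterate_zero_apply] at h
    exact pv_ok_init t m ht h
  | succ k ih =>
    intro t ht m hm h
    rw [Function.iterate_succ_apply'] at h
    set c := pvGstep^[k] pvG0 with hc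
    unfold pvGstep at h
    by_cases hbit : (m >>> t) &&& 1 = 1
    · rw [if_pos hbit] at h
      have hb : m.testBit t = true := (pv_bit_testBit m t).mp hbit
      have hxlt : m ^^^ (1 <<< t) < 1024 := pv_xor_lt m t hm ht
      have hsum : (if t > 0 then c (t - 1) m + c (t - 1) (m ^^^ (1 <<< t)) else 0)
          + (if t < 9 then c (t + 1) m + c (t + 1) (m ^^^ (1 <<< t)) else 0) ≠ 0 := by
        intro h0
        rw [h0] at h
        norm_num at h
      have hcases : (0 < t ∧ (c (t - 1) m ≠ 0 ∨ c (t - 1) (m ^^^ (1 <<< t)) ≠ 0))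
          ∨ (t < 9 ∧ (c (t + 1) m ≠ 0 ∨ c (t + 1) (m ^^^ (1 <<< t)) ≠ 0)) := by
        by_contra hno
        push_neg at hno
        obtain ⟨hL, hR⟩ := hno
        apply hsum
        have e1 : (if t > 0 then c (t - 1) m + c (t - 1) (m ^^^ (1 <<< t)) else 0) = 0 := by
          split_ifs with h0
          · obtain ⟨a1, a2⟩ := hL h0
            rw [a1, a2]; ring
          · rfl
        have e2 : (if t < 9 then c (t + 1) m + c (t + 1) (m ^^^ (1 <<< t)) else 0) = 0 := by
          split_ifs with h9
          · obtain ⟨a1, a2⟩ := hR h9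
            rw [a1, a2]; ring
          · rfl
        rw [e1, e2]; ring
      rcases hcases with ⟨h0, hor⟩ | ⟨h9, hor⟩
      · have hOK : pvOK (t - 1) m ∨ pvOK (t - 1) (m ^^^ (1 <<< t)) := by
          rcases hor with hne | hne
          · exact Or.inl (ih (t - 1) (by omega) m hm hne)
          · exact Or.inr (ih (t - 1) (by omega) _ hxlt hne)
        exact pv_step_ok t m ht hb (by tauto)
      · have hOK : pvOK (t + 1) m ∨ pvOK (t + 1) (m ^^^ (1 <<< t)) := by
          rcases hor with hne | hne
          · exact Or.inl (ih (t + 1) (by omega) m hm hne)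
          · exact Or.inr (ih (t + 1) (by omega) _ hxlt hne)
        exact pv_step_ok t m ht hb (by tauto)
    · rw [if_neg hbit] at h
      exact absurd rfl h

theorem pv_subset_testBit (m M : Nat) :
    m ||| M = M ↔ ∀ i, m.testBit i = true → M.testBit i = true := by
  constructor
  · intro h i hi
    have := congrArg (fun x => x.testBit i) h
    simpa [Nat.testBit_lor, hi] using this
  · intro h
    apply Nat.eq_of_testBit_eq
    intro i
    rw [Nat.testBit_lor]
    cases hm : m.testBit i
    · simp
    · simp [h i hm]

theorem pv_flip_cond (M d m : Nat) (hM : M.testBit d = true) :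
    (m ||| M = M ∧ m.testBit d = true) ↔
      ((m ^^^ (1 <<< d)) ||| M = M ∧ (m ^^^ (1 <<< d)).testBit d = false) := by
  have h1 : (1 : Nat) <<< d = 2 ^ d := by simp [Nat.shiftLeft_eq]
  rw [pv_subset_testBit, pv_subset_testBit, h1]
  constructor
  · rintro ⟨hsub, hbit⟩
    refine ⟨?_, ?_⟩
    · intro i hi
      rw [Nat.testBit_xor, Nat.testBit_two_pow] at hi
      by_cases hid : d = i
      · subst hid; exact hM
      · apply hsub
        simpa [hid] using hi
    · rw [Nat.testBit_xor, Nat.testBit_two_pow]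
      simp [hbit]
  · rintro ⟨hsub, hbit⟩
    have hmb : m.testBit d = true := by
      rw [Nat.testBit_xor, Nat.testBit_two_pow] at hbit
      simpa using hbit
    refine ⟨?_, hmb⟩
    intro i hi
    by_cases hid : d = i
    · subst hid; exact hM
    · apply hsub
      rw [Nat.testBit_xor, Nat.testBit_two_pow]
      simp [hid, hi]

-- sum of a cell function over all subsets of the mask M
def pvFsum (M : Nat) (c : Nat → Nat → Int) (t : Nat) : Int :=
  ∑ m ∈ Finset.range 1024, (if m ||| M = M then c t m else 0)

-- pairing the subsets with / without bit d: the scatter of both xor-variants collapses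
theorem pv_pair (M d : Nat) (hd : d < 10) (hM : M.testBit d = true) (f : Nat → Int) :
    (∑ m ∈ Finset.range 1024,
        if m ||| M = M ∧ m.testBit d = true then f m + f (m ^^^ (1 <<< d)) else 0)
      = ∑ m ∈ Finset.range 1024, if m ||| M = M then f m else 0 := by
  have hsplit : ∀ m : Nat,
      (if m ||| M = M ∧ m.testBit d = true then f m + f (m ^^^ (1 <<< d)) else 0)
        = (if m ||| M = M ∧ m.testBit d = true then f m else 0)
          + (if m ||| M = M ∧ m.testBit d = true then f (m ^^^ (1 <<< d)) else 0) := by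
    intro m; split_ifs <;> ring
  rw [Finset.sum_congr rfl (fun m _ => hsplit m), Finset.sum_add_distrib]
  have hre : ∀ m ∈ Finset.range 1024,
      (if m ||| M = M ∧ m.testBit d = true then f (m ^^^ (1 <<< d)) else 0)
        = (fun x => if x ||| M = M ∧ x.testBit d = false then f x else 0) (m ^^^ (1 <<< d)) := by
    intro m _
    have hfc := pv_flip_cond M d m hM
    by_cases h : m ||| M = M ∧ m.testBit d = true
    · rw [if_pos h]
      exact (if_pos (hfc.mp h)).symm
    · rw [if_neg h]
      exact (if_neg (fun hc => h (hfc.mpr hc))).symm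
  rw [Finset.sum_congr rfl hre]
  have hbij : (∑ m ∈ Finset.range 1024,
        (fun x => if x ||| M = M ∧ x.testBit d = false then f x else 0) (m ^^^ (1 <<< d)))
      = ∑ m ∈ Finset.range 1024, (if m ||| M = M ∧ m.testBit d = false then f m else 0) := by
    apply Finset.sum_nbij' (i := fun m => m ^^^ (1 <<< d)) (j := fun m => m ^^^ (1 <<< d))
    · intro a ha
      exact Finset.mem_range.mpr (pv_xor_lt a d (Finset.mem_range.mp ha) hd)
    · intro a ha
      exact Finset.mem_range.mpr (pv_xor_lt a d (Finset.mem_range.mp ha) hd)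
    · intro a _
      simp [Nat.xor_assoc]
    · intro a _
      simp [Nat.xor_assoc]
    · intro a _
      rfl
  rw [hbij, ← Finset.sum_add_distrib]
  apply Finset.sum_congr rfl
  intro m _
  by_cases h1 : m ||| M = M
  · cases hb : m.testBit d <;> simp [h1, hb]
  · simp [h1]

-- getD on a 10-entry comprehension row
theorem pv_getD_map10 (f : Nat → Int) (d : Nat) (hd : d < 10) :
    (((List.range 10).map f).getD d 0) = f d := by
  rw [PySem.List.getD_map_range]
  simp [hd]

-- B's row for range [lo, hi] tabulates the mask-subset sums of the gather recurrence, mod 10^9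
set_option maxRecDepth 40000 in
theorem pv_row (lo hi M : Nat)
    (hBit : ∀ d, d < 10 → (M.testBit d = true ↔ lo ≤ d ∧ d ≤ hi)) :
    ∀ k, ∀ d, d < 10 →
      ((pvRowStep lo hi)^[k] (pvRowInit lo hi)).getD d 0 =
        (pvFsum M (pvGstep^[k] pvG0) d) % 1000000000 := by
  intro k
  induction k with
  | zero =>
    intro d hd
    simp only [Function.iterate_zero_apply]
    unfold pvRowInit
    rw [pv_getD_map10 _ d hd]
    unfold pvFsum
    have hsummand : ∀ m : Nat,
        (if m ||| M = M then (pvG0 d m) else 0)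
          = (if m = 1 <<< d then (if (1 <<< d) ||| M = M ∧ 1 ≤ d then (1 : Int) else 0) else 0) := by
      intro m
      unfold pvG0
      by_cases hm : m = 1 <<< d
      · subst hm
        by_cases hsub : (1 <<< d) ||| M = M
        · simp [hsub]
        · simp [hsub]
      · have hno : ¬ (1 ≤ d ∧ m = 1 <<< d) := fun h => hm h.2
        simp [hm, hno]
    rw [Finset.sum_congr rfl (fun m _ => hsummand m)]
    rw [Finset.sum_ite_eq' (Finset.range 1024) (1 <<< d)]
    have hmem : (1 <<< d) ∈ Finset.range 1024 := by
      have h2 : (2 : Nat) ^ d < 2 ^ 10 := Nat.pow_lt_pow_right (by omega) hd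
      rw [Finset.mem_range, Nat.one_shiftLeft]
      norm_num at h2 ⊢
      omega
    rw [if_pos hmem]
    have hiff : ((1 <<< d) ||| M = M) ↔ (lo ≤ d ∧ d ≤ hi) := by
      rw [Nat.lor_comm, ← pv_bit_iff, pv_bit_testBit]
      exact hBit d hd
    by_cases hfin : lo ≤ d ∧ d ≤ hi ∧ 1 ≤ d
    · rw [if_pos hfin, if_pos ⟨hiff.mpr ⟨hfin.1, hfin.2.1⟩, hfin.2.2⟩]
      norm_num
    · rw [if_neg hfin,
          if_neg (fun hcon => hfin ⟨(hiff.mp hcon.1).1, (hiff.mp hcon.1).2, hcon.2⟩)]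
      norm_num
  | succ k ih =>
    intro d hd
    rw [Function.iterate_succ_apply']
    rw [Function.iterate_succ_apply']
    set c := pvGstep^[k] pvG0 with hc
    set r := (pvRowStep lo hi)^[k] (pvRowInit lo hi) with hr
    unfold pvRowStep
    rw [pv_getD_map10 _ d hd]
    by_cases hdin : lo ≤ d ∧ d ≤ hi
    · rw [if_pos hdin]
      have hMd : M.testBit d = true := (hBit d hd).mpr hdin
      have hL1 : (if d > 0 then r.getD (d - 1) 0 else 0)
          = (if d > 0 then pvFsum M c (d - 1) % 1000000000 else 0) := by
        split_ifs with h0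
        · exact ih (d - 1) (by omega)
        · rfl
      have hL2 : (if d < 9 then r.getD (d + 1) 0 else 0)
          = (if d < 9 then pvFsum M c (d + 1) % 1000000000 else 0) := by
        split_ifs with h9
        · exact ih (d + 1) (by omega)
        · rfl
      rw [hL1, hL2]
      have hpm : ∀ (P : Prop) (inst : Decidable P) (x : Int),
          (if P then x % 1000000000 else 0) = (if P then x else 0) % 1000000000 := by
        intro P inst x
        split_ifs <;> simp
      rw [hpm _ _ (pvFsum M c (d - 1)), hpm _ _ (pvFsum M c (d + 1)), ← Int.add_emod]
      unfold pvFsum pvGstep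
      have hsummand : ∀ m : Nat,
          (if m ||| M = M then
              (if (m >>> d) &&& 1 = 1 then
                ((if d > 0 then c (d - 1) m + c (d - 1) (m ^^^ (1 <<< d)) else 0) +
                 (if d < 9 then c (d + 1) m + c (d + 1) (m ^^^ (1 <<< d)) else 0)) % 1000000000
              else 0)
            else 0)
          = (if m ||| M = M ∧ m.testBit d = true then
                ((if d > 0 then c (d - 1) m + c (d - 1) (m ^^^ (1 <<< d)) else 0) +
                 (if d < 9 then c (d + 1) m + c (d + 1) (m ^^^ (1 <<< d)) else 0))
              else 0) % 1000000000 := by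
        intro m
        by_cases hs : m ||| M = M
        · by_cases hb : m.testBit d = true
          · have hb' : (m >>> d) &&& 1 = 1 := (pv_bit_testBit m d).mpr hb
            have hcond : m ||| M = M ∧ m.testBit d = true := ⟨hs, hb⟩
            rw [if_pos hs, if_pos hb', if_pos hcond]
          · have hb' : ¬ ((m >>> d) &&& 1 = 1) := fun hx => hb ((pv_bit_testBit m d).mp hx)
            rw [if_pos hs, if_neg hb', if_neg (fun hx => hb hx.2)]
            simp
        · rw [if_neg hs, if_neg (fun hx => hs hx.1)]
          simp
      rw [Finset.sum_congr rfl (fun m _ => hsummand m), ← Finset.sum_int_mod]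
      congr 1
      have hsplit : ∀ m : Nat,
          (if m ||| M = M ∧ m.testBit d = true then
              ((if d > 0 then c (d - 1) m + c (d - 1) (m ^^^ (1 <<< d)) else 0) +
               (if d < 9 then c (d + 1) m + c (d + 1) (m ^^^ (1 <<< d)) else 0))
            else 0)
          = (if d > 0 then
                (if m ||| M = M ∧ m.testBit d = true then
                    c (d - 1) m + c (d - 1) (m ^^^ (1 <<< d)) else 0)
              else 0)
            + (if d < 9 then
                (if m ||| M = M ∧ m.testBit d = true then
                    c (d + 1) m + c (d + 1) (m ^^^ (1 <<< d)) else 0)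
              else 0) := by
        intro m
        split_ifs <;> ring
      rw [Finset.sum_congr rfl (fun m _ => hsplit m), Finset.sum_add_distrib]
      congr 1
      · by_cases h0 : d > 0
        · simp only [h0, if_true]
          exact (pv_pair M d hd hMd (fun m => c (d - 1) m)).symm
        · simp [h0]
      · by_cases h9 : d < 9
        · simp only [h9, if_true]
          exact (pv_pair M d hd hMd (fun m => c (d + 1) m)).symm
        · simp [h9]
    · rw [if_neg hdin]
      have hMd : M.testBit d = false := by
        cases hMb : M.testBit d
        · rfl
        · exact absurd ((hBit d hd).mp hMb) hdin
      have hz : ∀ m ∈ Finset.range 1024,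
          (if m ||| M = M then pvGstep c d m else 0) = 0 := by
        intro m _
        split_ifs with hsub
        · have hmd : m.testBit d = false := by
            cases hmb : m.testBit d
            · rfl
            · have := (pv_subset_testBit m M).mp hsub d hmb
              rw [this] at hMd
              cases hMd
          unfold pvGstep
          rw [if_neg]
          intro hb
          rw [(pv_bit_testBit m d).mp hb] at hmd
          cases hmd
        · rfl
      unfold pvFsum
      rw [Finset.sum_congr rfl hz, Finset.sum_const_zero]
      norm_num

-- one interval mask is a subset of another iff the intervals are nested
theorem pv_iv_subset (a b a2 b2 : Nat) (hab : a ≤ b) (hab2 : a2 ≤ b2) :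
    (pvIvMask a b ||| pvIvMask a2 b2 = pvIvMask a2 b2) ↔ (a2 ≤ a ∧ b ≤ b2) := by
  rw [pv_subset_testBit]
  constructor
  · intro h
    have h1 := h a (by rw [pv_ivMask_testBit a b a hab]; exact decide_eq_true (by omega))
    have h2 := h b (by rw [pv_ivMask_testBit a b b hab]; exact decide_eq_true (by omega))
    rw [pv_ivMask_testBit a2 b2 a hab2] at h1
    rw [pv_ivMask_testBit a2 b2 b hab2] at h2
    have c1 := of_decide_eq_true h1
    have c2 := of_decide_eq_true h2
    omega
  · rintro ⟨h1, h2⟩ i hi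
    rw [pv_ivMask_testBit a b i hab] at hi
    rw [pv_ivMask_testBit a2 b2 i hab2]
    have hc := of_decide_eq_true hi
    exact decide_eq_true (by omega)

-- an interval mask determines its endpoints
theorem pv_ivMask_eq_1023 (a b : Nat) (hab : a ≤ b) (hb9 : b ≤ 9) :
    pvIvMask a b = 1023 ↔ (a = 0 ∧ b = 9) := by
  constructor
  · intro he
    have h0 : (pvIvMask a b).testBit 0 = true := by
      rw [he]; decide
    have h9 : (pvIvMask a b).testBit 9 = true := by
      rw [he]; decide
    rw [pv_ivMask_testBit a b 0 hab] at h0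
    rw [pv_ivMask_testBit a b 9 hab] at h9
    have c0 := of_decide_eq_true h0
    have c9 := of_decide_eq_true h9
    -- bits 0 and 9 are both set, so the interval is all of 0..9 ... endpoints follow
    exact ⟨by omega, by omega⟩
  · rintro ⟨rfl, rfl⟩
    decide

-- inclusion-exclusion over the four digit ranges picks out exactly the full mask
theorem pv_incl_excl (k : Nat) :
    (∑ t ∈ Finset.range 10, pvFsum 1023 (pvGstep^[k] pvG0) t)
      - (∑ t ∈ Finset.range 10, pvFsum 1022 (pvGstep^[k] pvG0) t)
      - (∑ t ∈ Finset.range 10, pvFsum 511 (pvGstep^[k] pvG0) t)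
      + (∑ t ∈ Finset.range 10, pvFsum 510 (pvGstep^[k] pvG0) t)
    = ∑ t ∈ Finset.range 10, (pvGstep^[k] pvG0) t 1023 := by
  set c := pvGstep^[k] pvG0 with hc
  rw [← Finset.sum_sub_distrib, ← Finset.sum_sub_distrib, ← Finset.sum_add_distrib]
  apply Finset.sum_congr rfl
  intro t htm
  have ht : t < 10 := Finset.mem_range.mp htm
  unfold pvFsum
  rw [← Finset.sum_sub_distrib, ← Finset.sum_sub_distrib, ← Finset.sum_add_distrib]
  have hpt : ∀ m ∈ Finset.range 1024,
      ((if m ||| 1023 = 1023 then c t m else 0) - (if m ||| 1022 = 1022 then c t m else 0)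
        - (if m ||| 511 = 511 then c t m else 0) + (if m ||| 510 = 510 then c t m else 0))
      = (if m = 1023 then c t m else 0) := by
    intro m hmm
    have hm : m < 1024 := Finset.mem_range.mp hmm
    by_cases hz : c t m = 0
    · rw [hz]
      split_ifs <;> ring
    · obtain ⟨a, b, hat, htb, hb9, rfl⟩ := pv_inv k t ht m hm hz
      have hab : a ≤ b := le_trans hat htb
      have hI1 : pvIvMask a b ||| 1023 = 1023 := by
        rw [show (1023 : Nat) = pvIvMask 0 9 from by decide]
        exact (pv_iv_subset a b 0 9 hab (by omega)).mpr ⟨by omega, by omega⟩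
      have hI2 : (pvIvMask a b ||| 1022 = 1022) ↔ 1 ≤ a := by
        rw [show (1022 : Nat) = pvIvMask 1 9 from by decide,
            pv_iv_subset a b 1 9 hab (by omega)]
        omega
      have hI3 : (pvIvMask a b ||| 511 = 511) ↔ b ≤ 8 := by
        rw [show (511 : Nat) = pvIvMask 0 8 from by decide,
            pv_iv_subset a b 0 8 hab (by omega)]
        omega
      have hI4 : (pvIvMask a b ||| 510 = 510) ↔ (1 ≤ a ∧ b ≤ 8) := by
        rw [show (510 : Nat) = pvIvMask 1 8 from by decide,
            pv_iv_subset a b 1 8 hab (by omega)]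
      have hEq := pv_ivMask_eq_1023 a b hab hb9
      rw [if_pos hI1]
      by_cases hA : 1 ≤ a <;> by_cases hB : b ≤ 8
      · rw [if_pos (hI2.mpr hA), if_pos (hI3.mpr hB), if_pos (hI4.mpr ⟨hA, hB⟩),
            if_neg (fun he => by have := hEq.mp he; omega)]
        ring
      · rw [if_pos (hI2.mpr hA), if_neg (fun he => hB (hI3.mp he)),
            if_neg (fun he => hB (hI4.mp he).2),
            if_neg (fun he => by have := hEq.mp he; omega)]
        ring
      · rw [if_neg (fun he => hA (hI2.mp he)), if_pos (hI3.mpr hB),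
            if_neg (fun he => hA (hI4.mp he).1),
            if_neg (fun he => by have := hEq.mp he; omega)]
        ring
      · rw [if_neg (fun he => hA (hI2.mp he)), if_neg (fun he => hB (hI3.mp he)),
            if_neg (fun he => hA (hI4.mp he).1),
            if_pos (hEq.mpr ⟨by omega, by omega⟩)]
        ring
  rw [Finset.sum_congr rfl hpt]
  rw [Finset.sum_ite_eq' (Finset.range 1024) 1023]
  simp

-- B's row list is literally a 10-entry comprehension at every step
theorem pv_row_as_map (lo hi : Nat) (k : Nat) :
    (pvRowStep lo hi)^[k] (pvRowInit lo hi)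
      = (List.range 10).map (fun d => ((pvRowStep lo hi)^[k] (pvRowInit lo hi)).getD d 0) := by
  cases k with
  | zero =>
    simp only [Function.iterate_zero_apply]
    unfold pvRowInit
    apply List.map_congr_left
    intro d hd
    symm
    exact pv_getD_map10 _ d (List.mem_range.mp hd)
  | succ k =>
    simp only [Function.iterate_succ_apply']
    unfold pvRowStep
    apply List.map_congr_left
    intro d hd
    symm
    exact pv_getD_map10 _ d (List.mem_range.mp hd)

theorem pv_countRange_eq (n : Int) (lo hi M : Nat)
    (hBit : ∀ d, d < 10 → (M.testBit d = true ↔ lo ≤ d ∧ d ≤ hi)) :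
    pvCountRange n lo hi
      = (∑ t ∈ Finset.range 10, pvFsum M (pvGstep^[(n - 1).toNat] pvG0) t) % 1000000000 := by
  unfold pvCountRange
  rw [pv_foldl_const]
  have hlen : (PySem.List.pyRange 0 (n - 1) 1).length = (n - 1).toNat := by
    simp [PySem.List.length_pyRange_one]
  rw [hlen]
  rw [pv_row_as_map lo hi ((n - 1).toNat)]
  have hsum : (((List.range 10).map
        (fun d => ((pvRowStep lo hi)^[(n - 1).toNat] (pvRowInit lo hi)).getD d 0)).sum)
      = ∑ d ∈ Finset.range 10,
          ((pvRowStep lo hi)^[(n - 1).toNat] (pvRowInit lo hi)).getD d 0 := rfl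
  rw [hsum]
  have hcong : ∀ d ∈ Finset.range 10,
      ((pvRowStep lo hi)^[(n - 1).toNat] (pvRowInit lo hi)).getD d 0
        = pvFsum M (pvGstep^[(n - 1).toNat] pvG0) d % 1000000000 :=
    fun d hdm => pv_row lo hi M hBit ((n - 1).toNat) d (Finset.mem_range.mp hdm)
  rw [Finset.sum_congr rfl hcong, ← Finset.sum_int_mod]

-- ===== VERDICT (by name: the statements are the Claim_ definitions above) =====
theorem count_stair_numbers_spec : Claim_equal_count_stair_numbers := by
  intro n _ hpre
  unfold Spec_count_stair_numbers count_stair_numbers count_stair_numbers_alt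
  have hlen1 : (PySem.List.pyRange 1 n 1).length = (n - 1).toNat :=
    PySem.List.length_pyRange_one 1 n
  rw [pv_foldl_const, hlen1]
  set k := (n - 1).toNat with hk
  have hA : (List.range 10).foldl
      (fun answer last => (answer + pvAtArr (pvPushLayerArr^[k] pvInitArr) last 1023) % 1000000000) 0
      = ((List.range 10).map (fun last => pvAtArr (pvPushLayerArr^[k] pvInitArr) last 1023)).foldl
        (fun x v => (x + v) % 1000000000) 0 := by
    rw [List.foldl_map]
  rw [hA, pv_chain_red _ 0 (by norm_num)]
  have hAsum : ((List.range 10).map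
        (fun last => pvAtArr (pvPushLayerArr^[k] pvInitArr) last 1023)).sum
      = ∑ t ∈ Finset.range 10, (pvGstep^[k] pvG0) t 1023 := by
    have hfs : ((List.range 10).map
          (fun last => pvAtArr (pvPushLayerArr^[k] pvInitArr) last 1023)).sum
        = ∑ t ∈ Finset.range 10, pvAtArr (pvPushLayerArr^[k] pvInitArr) t 1023 := rfl
    rw [hfs]
    exact Finset.sum_congr rfl
      (fun t htm => (pv_iterA k).2 t (Finset.mem_range.mp htm) 1023 (by norm_num))
  rw [hAsum]
  rw [pv_countRange_eq n 0 9 1023 (by decide), pv_countRange_eq n 1 9 1022 (by decide),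
      pv_countRange_eq n 0 8 511 (by decide), pv_countRange_eq n 1 8 510 (by decide)]
  rw [PySem.Int.mod_eq_emod_of_pos (by norm_num)]
  rw [← hk]
  have hIE := pv_incl_excl k
  omega
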